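-- pv_equiv track=rewrite | github.com/pypi-data/pypi-mirror-195 | packages/promptware/promptware-0.1.3.dev0.tar.gz/promptware-0.1.3.dev0/softwares/prompt_engineer/software.py | get_paired_text
-- ===== SOURCE A (Python) =====
-- def get_paired_text(data: list[tuple]) -> str:
--     """
--     Given a list of tuples, return the text that is paired.
--
--     :param data: A list of tuples.
--     :return: The text that is paired.
--     """
--     if len(data) == 0:
--         raise ValueError("No paired data")
--
--     pairs = ""
--     for i in range(len(data)):
--         if i != len(data) - 1:
--             pairs += f"Input:{data[i][0]}\nOutput:{data[i][1]}\n\n"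
--         else:
--             pairs += f"Input:{data[i][0]}\nOutput:{data[i][1]}\n"
--     return pairs
-- ===== SOURCE B (Python) =====
-- def get_paired_text(data: list) -> str:
--     """
--     Given a list of tuples, return the text that is paired.
--
--     B: divide and conquer — a half gives its own paired text, and the two
--     texts are glued with the blank-line separator; the base case is one pair.
--     """
--     if len(data) == 0:
--         raise ValueError("No paired data")
--     return _paired(data)
--
--
-- def _paired(data):
--     if len(data) == 1:
--         a, b = data[0]
--         return f"Input:{a}\nOutput:{b}\n"
--     mid = len(data) // 2
--     return _paired(data[:mid]) + "\n" + _paired(data[mid:])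
-- ===== Notes on version B (the rewrite author's own statement) =====
-- stated objective: alternative
-- what changed: Replaces the single range-indexed accumulator loop with its last-index branch by a divide-and-conquer recursion: each half is formatted recursively and the two texts are concatenated with the blank-line separator, the base case being one pair.
-- outside the precondition, e.g. on get_paired_text([]): A raises ValueError, B raises ValueError
import Mathlib
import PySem

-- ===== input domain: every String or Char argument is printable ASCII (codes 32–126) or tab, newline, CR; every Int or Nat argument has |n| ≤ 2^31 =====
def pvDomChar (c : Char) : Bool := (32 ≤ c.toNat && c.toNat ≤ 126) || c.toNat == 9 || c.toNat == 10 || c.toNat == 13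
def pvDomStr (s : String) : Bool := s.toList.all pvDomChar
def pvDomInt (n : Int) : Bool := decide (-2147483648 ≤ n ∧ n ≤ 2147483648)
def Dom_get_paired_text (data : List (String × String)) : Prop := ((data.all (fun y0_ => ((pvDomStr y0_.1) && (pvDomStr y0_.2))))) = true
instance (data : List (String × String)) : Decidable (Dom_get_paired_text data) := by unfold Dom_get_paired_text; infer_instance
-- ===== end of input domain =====

-- B replaces A's range-indexed accumulator loop and its last-index branch by a
-- divide-and-conquer recursion gluing the two halves' texts with the blank-line
-- separator (alternative decomposition; same result).

-- ===== PORT A =====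
def get_paired_text (data : List (String × String)) : String :=
  (PySem.List.pyRange 0 (data.length : Int) 1).foldl
    (fun pairs i =>
      if i ≠ (data.length : Int) - 1 then
        pairs ++ ("Input:" ++ (PySem.List.pyGetD data i ("", "")).1 ++ "\nOutput:" ++ (PySem.List.pyGetD data i ("", "")).2 ++ "\n\n")
      else
        pairs ++ ("Input:" ++ (PySem.List.pyGetD data i ("", "")).1 ++ "\nOutput:" ++ (PySem.List.pyGetD data i ("", "")).2 ++ "\n"))
    ""

-- ===== PORT B =====
-- Python's _paired is only ever called on a nonempty list (the guard raises on
-- []); the [] branches here return "" purely for totality.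
def pvPaired (l : List (String × String)) : String :=
  if l.length = 1 then
    match l with
    | (a, b) :: _ => "Input:" ++ a ++ "\nOutput:" ++ b ++ "\n"
    | [] => ""
  else if l.length = 0 then ""
  else
    pvPaired (l.take (l.length / 2)) ++ "\n" ++ pvPaired (l.drop (l.length / 2))
termination_by l.length
decreasing_by
  · simp only [List.length_take]; omega
  · simp only [List.length_drop]; omega

def get_paired_text_alt (data : List (String × String)) : String :=
  pvPaired data

-- ===== PRECONDITION & SPEC =====
-- Pre_ excludes only the empty list, on which both Pythons raise ValueError("No paired data").
def Pre_get_paired_text (data : List (String × String)) : Prop := data ≠ []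
instance (data : List (String × String)) : Decidable (Pre_get_paired_text data) := by unfold Pre_get_paired_text; infer_instance
def pvWitness_get_paired_text : (List (String × String)) := [("a", "b")]

def Spec_get_paired_text (data : List (String × String)) (out : String) : Prop := out = get_paired_text_alt data
instance (data : List (String × String)) (out : String) : Decidable (Spec_get_paired_text data out) := by unfold Spec_get_paired_text; infer_instance

-- ===== CLAIM (what is proved, stated in full; the proofs are below) =====
def Claim_equal_get_paired_text : Prop := ∀ (data : List (String × String)), Dom_get_paired_text data → Pre_get_paired_text data → Spec_get_paired_text data (get_paired_text data)

-- ===== LEMMAS AND PROOFS =====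

def pvBlock (p : String × String) : String :=
  "Input:" ++ p.1 ++ "\nOutput:" ++ p.2 ++ "\n"

theorem pv_pyGetD_append_left (xs ys : List (String × String)) (i : Int) (d : String × String)
    (h0 : 0 ≤ i) (h : i < xs.length) :
    PySem.List.pyGetD (xs ++ ys) i d = PySem.List.pyGetD xs i d := by
  rw [PySem.List.pyGetD_eq_getElem _ d h0 (by simp; omega),
      PySem.List.pyGetD_eq_getElem _ d h0 (by simpa using h)]
  exact List.getElem_append_left (by omega)

theorem pv_pyGetD_append_last (xs : List (String × String)) (y d : String × String) :
    PySem.List.pyGetD (xs ++ [y]) (xs.length : Int) d = y := by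
  rw [PySem.List.pyGetD_eq_getElem _ d (by positivity) (by simp)]
  simp

theorem pv_join_cons₂ (s h : String) (tl : List String) :
    PySem.Str.join "\n" (s :: h :: tl) = s ++ "\n" ++ PySem.Str.join "\n" (h :: tl) := by
  apply String.toList_injective
  simp [PySem.Str.join, PySem.Chars.join, List.intercalate]

theorem pv_join_singleton (b acc : String) : acc ++ b = acc ++ PySem.Str.join "\n" [b] := by
  apply String.toList_injective
  simp [PySem.Str.join, PySem.Chars.join, List.intercalate]

theorem pv_join_single (b : String) : PySem.Str.join "\n" [b] = b := by
  apply String.toList_injective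
  simp [PySem.Str.join, PySem.Chars.join, List.intercalate]

-- joining two nonempty lists of blocks splits around one separator
theorem pv_join_append (l1 l2 : List String) (h1 : l1 ≠ []) (h2 : l2 ≠ []) :
    PySem.Str.join "\n" (l1 ++ l2) = PySem.Str.join "\n" l1 ++ "\n" ++ PySem.Str.join "\n" l2 := by
  induction l1 with
  | nil => exact absurd rfl h1
  | cons s t ih =>
      obtain ⟨h, tl, rfl⟩ : ∃ h tl, l2 = h :: tl := by
        cases l2 with
        | nil => exact absurd rfl h2
        | cons x xs => exact ⟨x, xs, rfl⟩
      cases t with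
      | nil => simpa [pv_join_single] using pv_join_cons₂ s h tl
      | cons y u =>
          have := ih (by simp)
          calc PySem.Str.join "\n" ((s :: y :: u) ++ h :: tl)
              = s ++ "\n" ++ PySem.Str.join "\n" ((y :: u) ++ h :: tl) := by
                  exact pv_join_cons₂ s y (u ++ h :: tl)
            _ = s ++ "\n" ++ (PySem.Str.join "\n" (y :: u) ++ "\n" ++ PySem.Str.join "\n" (h :: tl)) := by rw [this]
            _ = PySem.Str.join "\n" (s :: y :: u) ++ "\n" ++ PySem.Str.join "\n" (h :: tl) := by
                  rw [pv_join_cons₂ s y u]; simp [String.append_assoc]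

-- the trailing-separator fold over all but the last block equals join of all the blocks
theorem pv_join_strings (b : String) :
    ∀ (l : List String) (acc : String),
      (l.foldl (fun a s => a ++ (s ++ "\n")) acc) ++ b = acc ++ PySem.Str.join "\n" (l ++ [b]) := by
  intro l
  induction l with
  | nil => intro acc; simpa using pv_join_singleton b acc
  | cons s t ih =>
      intro acc
      have hne : ∃ h tl, t ++ [b] = h :: tl := by
        cases t with
        | nil => exact ⟨b, [], rfl⟩
        | cons x xs => exact ⟨x, xs ++ [b], rfl⟩
      obtain ⟨h, tl, hht⟩ := hne
      calc ((s :: t).foldl (fun a s => a ++ (s ++ "\n")) acc) ++ b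
          = (t.foldl (fun a s => a ++ (s ++ "\n")) (acc ++ (s ++ "\n"))) ++ b := by simp
        _ = (acc ++ (s ++ "\n")) ++ PySem.Str.join "\n" (t ++ [b]) := ih _
        _ = acc ++ PySem.Str.join "\n" ((s :: t) ++ [b]) := by
              rw [show (s :: t) ++ [b] = s :: (t ++ [b]) from rfl, hht, pv_join_cons₂]
              simp [String.append_assoc]

-- A's indexed loop produces the join of the per-pair blocks
theorem pvA_join (xs : List (String × String)) (y : String × String) :
    get_paired_text (xs ++ [y]) = PySem.Str.join "\n" ((xs ++ [y]).map pvBlock) := by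
  unfold get_paired_text
  have hlen : (((xs ++ [y]).length : Nat) : Int) = (xs.length : Int) + 1 := by
    simp
  rw [hlen]
  rw [PySem.List.pyRange_one_succ_right (by positivity)]
  rw [List.foldl_append]
  have hlast : ¬ ((xs.length : Int) ≠ (xs.length : Int) + 1 - 1) := by omega
  simp only [List.foldl_cons, List.foldl_nil, if_neg hlast,
    pv_pyGetD_append_last xs y ("", "")]
  rw [PySem.List.foldl_congr_mem _ _
    (fun pairs i => pairs ++ (("Input:" ++ (PySem.List.pyGetD xs i ("", "")).1 ++ "\nOutput:" ++ (PySem.List.pyGetD xs i ("", "")).2 ++ "\n") ++ "\n")) ""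
    (by
      intro acc i hi
      obtain ⟨h0, h1⟩ := PySem.List.mem_pyRange_one.mp hi
      rw [if_pos (by omega), pv_pyGetD_append_left xs [y] i ("", "") h0 h1]
      simp [String.append_assoc])]
  rw [show (fun pairs i => pairs ++ (("Input:" ++ (PySem.List.pyGetD xs i ("", "")).1 ++ "\nOutput:" ++ (PySem.List.pyGetD xs i ("", "")).2 ++ "\n") ++ "\n"))
        = (fun pairs i => (fun a p => a ++ (pvBlock p ++ "\n")) pairs (PySem.List.pyGetD xs i ("", ""))) from rfl]
  rw [PySem.List.foldl_pyRange_zero_pyGetD' xs ("", "") (fun a p => a ++ (pvBlock p ++ "\n")) ""]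
  rw [← List.foldl_map (f := pvBlock) (g := fun a s => a ++ (s ++ "\n"))]
  have := pv_join_strings (pvBlock y) (xs.map pvBlock) ""
  simp only [List.map_append, List.map_cons, List.map_nil] at *
  rw [show "Input:" ++ y.1 ++ "\nOutput:" ++ y.2 ++ "\n" = pvBlock y by simp [pvBlock, String.append_assoc]]
  simpa using this

-- B's divide-and-conquer recursion produces the same join of blocks
theorem pvFmt_eq_join (n : Nat) :
    ∀ l : List (String × String), l.length ≤ n → l ≠ [] →
      pvPaired l = PySem.Str.join "\n" (l.map pvBlock) := by
  induction n with
  | zero => exact fun l hl hne => absurd (List.eq_nil_of_length_eq_zero (by omega)) hne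
  | succ n ih =>
      intro l hl hne
      rw [pvPaired.eq_def]
      by_cases h1 : l.length = 1
      · obtain ⟨p, rfl⟩ : ∃ p, l = [p] := by
          cases l with
          | nil => simp at h1
          | cons a t => cases t with
            | nil => exact ⟨a, rfl⟩
            | cons b u => simp at h1
        obtain ⟨a, b⟩ := p
        simp [pv_join_single, pvBlock, String.append_assoc]
      · have h0 : l.length ≠ 0 := by simpa using hne
        rw [if_neg h1, if_neg h0]
        have h2 : 2 ≤ l.length := by omega
        have htake : (l.take (l.length / 2)).length = l.length / 2 := by
          simp; omega
        have hdrop : (l.drop (l.length / 2)).length = l.length - l.length / 2 := by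
          simp
        rw [ih _ (by rw [htake]; omega) (by intro h; rw [h] at htake; simp at htake; omega),
            ih _ (by rw [hdrop]; omega) (by intro h; rw [h] at hdrop; simp at hdrop; omega)]
        rw [← pv_join_append _ _ (by simp; exact ⟨by omega, hne⟩) (by simp; omega)]
        rw [← List.map_append, List.take_append_drop]

-- ===== VERDICT (by name: the statement is the Claim_ definition above) =====
theorem get_paired_text_spec : Claim_equal_get_paired_text := by
  intro data _ hpre
  unfold Spec_get_paired_text get_paired_text_alt
  rcases List.eq_nil_or_concat data with h' | ⟨xs, y, rfl⟩
  · exact absurd h' hpre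
  · rw [List.concat_eq_append, pvA_join,
        pvFmt_eq_join (xs ++ [y]).length _ le_rfl (by simp)]
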